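-- pv_equiv track=rewrite | github.com/jdh9232/jdh_leetcode | 838-push-dominoes/838-push-dominoes.py | leftside
-- ===== SOURCE A (Python) =====
-- def leftside(minostr: str):
--     mino = list(minostr)
--     break_down = False
--     for i in range(len(mino) - 1, -1, -1):
--         if mino[i] == "L":
--             break_down = True
--             continue
--         if mino[i] == "R":
--             break_down = False
--             continue
--         # mino [i] == "."
--         if break_down is True:
--             mino[i] = 'L'
--     return "".join(mino)
-- ===== SOURCE B (Python) =====
-- def leftside(minostr: str):
--     out = []
--     buf = []
--     for c in minostr:
--         if c == 'L':
--             out.append('L' * (len(buf) + 1))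
--             buf = []
--         elif c == 'R':
--             out.extend(buf)
--             out.append('R')
--             buf = []
--         else:
--             buf.append(c)
--     out.extend(buf)
--     return ''.join(out)
-- ===== Notes on version B (the rewrite author's own statement) =====
-- stated objective: alternative
-- what changed: Replaced A's right-to-left in-place index loop with a break_down flag by a single left-to-right pass that buffers the characters seen since the last push delimiter and flushes the buffer as left-pushes when the closing delimiter is a left push, otherwise unchanged.
import Mathlib
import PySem

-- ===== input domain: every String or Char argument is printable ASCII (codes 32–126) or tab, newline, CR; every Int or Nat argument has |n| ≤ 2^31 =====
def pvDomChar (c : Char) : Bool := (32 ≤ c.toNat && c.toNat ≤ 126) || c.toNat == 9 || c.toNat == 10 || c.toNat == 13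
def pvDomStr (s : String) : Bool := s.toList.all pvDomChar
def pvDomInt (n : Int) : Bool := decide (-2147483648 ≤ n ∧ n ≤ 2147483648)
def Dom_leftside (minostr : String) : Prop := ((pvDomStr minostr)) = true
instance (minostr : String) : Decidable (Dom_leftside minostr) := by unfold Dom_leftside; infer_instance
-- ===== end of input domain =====

-- B replaces A's backward in-place index loop with a single forward pass that buffers
-- characters since the last delimiter and flushes them as 'L's on an 'L', unchanged on an 'R' or at the end (objective: alternative).


-- ===== PORT A =====
-- A walks the list right-to-left with a break_down flag; the flag is threaded from
-- the right end (initially False), so the loop is transcribed as structural recursion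
-- whose state flows out of the recursive call on the suffix.
def leftsideAuxA : List Char → List Char × Bool
  | [] => ([], false)
  | c :: rest =>
    let (rest', bd) := leftsideAuxA rest
    if c = 'L' then ('L' :: rest', true)
    else if c = 'R' then ('R' :: rest', false)
    else if bd then ('L' :: rest', bd)
    else (c :: rest', bd)

def leftside (minostr : String) : String :=
  String.mk (leftsideAuxA minostr.toList).1

-- ===== PORT B =====
def leftsideAuxB : List Char → List Char → List Char
  | buf, [] => buf
  | buf, c :: rest =>
    if c = 'L' then List.replicate (buf.length + 1) 'L' ++ leftsideAuxB [] rest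
    else if c = 'R' then buf ++ 'R' :: leftsideAuxB [] rest
    else leftsideAuxB (buf ++ [c]) rest

def leftside_alt (minostr : String) : String :=
  String.mk (leftsideAuxB [] minostr.toList)

-- ===== PRECONDITION & SPEC =====
def Spec_leftside (minostr : String) (out : String) : Prop := out = leftside_alt minostr
instance (minostr : String) (out : String) : Decidable (Spec_leftside minostr out) := by unfold Spec_leftside; infer_instance

-- ===== CLAIM (what is proved, stated in full; the proofs are below) =====
def Claim_equal_leftside : Prop := ∀ (minostr : String), Dom_leftside minostr → Spec_leftside minostr (leftside minostr)

-- ===== LEMMAS AND PROOFS =====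
theorem replicate_cons_shift (n : Nat) (a : Char) (t : List Char) :
    List.replicate n a ++ a :: t = List.replicate (n + 1) a ++ t := by
  induction n with
  | zero => rfl
  | succ k ih => simpa [List.replicate] using ih

-- invariant: B with buffer buf equals A's result prefixed by buf, with buf turned
-- into 'L's exactly when A's outgoing flag is set
theorem auxB_eq_auxA (l buf : List Char) :
    leftsideAuxB buf l =
      (if (leftsideAuxA l).2 then List.replicate buf.length 'L' else buf) ++ (leftsideAuxA l).1 := by
  induction l generalizing buf with
  | nil => simp [leftsideAuxA, leftsideAuxB]
  | cons c rest ih =>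
    by_cases hL : c = 'L'
    · simp [leftsideAuxA, leftsideAuxB, hL, ih, replicate_cons_shift]
    · by_cases hR : c = 'R'
      · simp [leftsideAuxA, leftsideAuxB, hR, ih]
      · by_cases hbd : (leftsideAuxA rest).2
        · simp [leftsideAuxA, leftsideAuxB, hL, hR, hbd, ih, replicate_cons_shift]
        · simp [leftsideAuxA, leftsideAuxB, hL, hR, hbd, ih]

-- ===== VERDICT (by name: the statement is the Claim_ definition above) =====
theorem leftside_spec : Claim_equal_leftside := by
  intro s _
  unfold Spec_leftside leftside leftside_alt
  rw [auxB_eq_auxA]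
  split <;> simp
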